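-- pv_equiv track=rewrite | github.com/tarunganesh2004/Leetcode | LC Mothly/2025/February/13th_feb.py | minOperationsBrute
-- ===== SOURCE A (Python) =====
-- def minOperationsBrute(nums,k):
--     operations=0
--     while min(nums)<k:
--         nums.sort()
--         if len(nums)==1:
--             return -1
--         operations+=1
--         x,y=nums[0],nums[1]
--         nums.pop(0)
--         nums.pop(0)
--         nums.append(min(x,y)*2+max(x,y))
--     return operations
-- ===== SOURCE B (Python) =====
-- def _insert_sorted(rest, v):
--     # rest is sorted ascending; splice v in right before the first element greater than v
--     i = 0
--     while i < len(rest) and rest[i] <= v: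
--         i += 1
--     return rest[:i] + [v] + rest[i:]
--
--
-- def minOperationsBrute(nums, k):
--     # sort ONCE, then keep the working list sorted by ordered insertion (no re-sort, no pop(0))
--     arr = sorted(nums)
--     ops = 0
--     while arr and arr[0] < k:
--         if len(arr) == 1:
--             return -1
--         arr = _insert_sorted(arr[2:], 2 * arr[0] + arr[1])
--         ops += 1
--     return ops
-- ===== Notes on version B (the rewrite author's own statement) =====
-- stated objective: faster
-- what changed: Instead of re-sorting the whole list, re-scanning for min, and popping from the front on every iteration, B sorts once and maintains the sorted working list by a single ordered insertion of each combined value, reading the two minima at the front; B also does not mutate the caller's list.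
import Mathlib
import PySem

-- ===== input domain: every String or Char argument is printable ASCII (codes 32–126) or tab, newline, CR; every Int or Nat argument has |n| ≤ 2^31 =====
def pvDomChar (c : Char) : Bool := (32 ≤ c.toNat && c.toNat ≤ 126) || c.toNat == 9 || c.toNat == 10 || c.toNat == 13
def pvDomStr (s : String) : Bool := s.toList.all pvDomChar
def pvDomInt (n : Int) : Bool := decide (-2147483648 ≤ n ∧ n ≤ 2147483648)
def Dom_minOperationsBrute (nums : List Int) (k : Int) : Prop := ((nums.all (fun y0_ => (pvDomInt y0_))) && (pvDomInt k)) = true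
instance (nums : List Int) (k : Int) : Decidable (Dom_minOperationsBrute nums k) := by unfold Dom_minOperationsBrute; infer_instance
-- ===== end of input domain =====

-- B sorts once and maintains the working list by ordered insertion instead of re-sorting
-- and re-scanning for the minimum on every iteration (objective: alternative, same result).
-- A mutates its list argument in place (sort/pop/append); B does not — the equivalence
-- proved here is about the RETURN value only.

-- ===== PORT A =====
-- while min(nums) < k: sort; if len == 1 return -1; pop the two smallest x,y;
-- append min(x,y)*2 + max(x,y).  min([]) raises ValueError → the `none` branch is
-- outside Pre_ (returns a dummy 0 there).
def minOpsALoop (nums : List Int) (k : Int) (operations : Int) : Int :=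
  match PySem.List.min? nums (fun x => x) with
  | none => 0      -- Python raises ValueError here; excluded by Pre_
  | some m =>
    if m < k then
      match h : PySem.List.sorted nums (fun x => x) with
      | [] => 0                                   -- unreachable: nums ≠ [] since min? ≠ none
      | [_] => -1                                 -- len(nums) == 1
      | x :: y :: rest =>                         -- x,y = nums[0],nums[1]; pop(0); pop(0); append
          minOpsALoop (rest ++ [min x y * 2 + max x y]) k (operations + 1)
    else operations
termination_by nums.length
decreasing_by
  have hl : (PySem.List.sorted nums (fun x => x)).length = nums.length :=
    PySem.List.length_sorted nums (fun x => x) false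
  rw [h] at hl
  simp at hl ⊢
  omega

def minOperationsBrute (nums : List Int) (k : Int) : Int :=
  minOpsALoop nums k 0

-- ===== PORT B =====
-- the index scan `while i < len(rest) and rest[i] <= v: i += 1` of _insert_sorted
def minOpsInsPos (rest : List Int) (v : Int) : Nat :=
  match rest with
  | [] => 0
  | x :: xs => if x ≤ v then minOpsInsPos xs v + 1 else 0

-- rest[:i] + [v] + rest[i:]
def minOpsInsert (rest : List Int) (v : Int) : List Int :=
  rest.take (minOpsInsPos rest v) ++ [v] ++ rest.drop (minOpsInsPos rest v)

lemma minOpsInsert_length (rest : List Int) (v : Int) :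
    (minOpsInsert rest v).length = rest.length + 1 := by
  simp [minOpsInsert]

-- while arr and arr[0] < k: if len == 1 return -1; combine the two front elements
def minOpsBLoop (arr : List Int) (k : Int) (ops : Int) : Int :=
  match arr with
  | [] => ops
  | [a] => if a < k then -1 else ops
  | a :: b :: rest =>
      if a < k then minOpsBLoop (minOpsInsert rest (2 * a + b)) k (ops + 1)
      else ops
termination_by arr.length
decreasing_by
  all_goals simp [minOpsInsert_length]


def minOperationsBrute_alt (nums : List Int) (k : Int) : Int :=
  minOpsBLoop (PySem.List.sorted nums (fun x => x)) k 0

-- ===== PRECONDITION & SPEC =====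
-- Pre_ excludes only the empty list, on which Python's min([]) raises ValueError.
def Pre_minOperationsBrute (nums : List Int) (k : Int) : Prop := nums ≠ []
instance (nums : List Int) (k : Int) : Decidable (Pre_minOperationsBrute nums k) := by
  unfold Pre_minOperationsBrute; infer_instance

def pvWitness_minOperationsBrute : List Int × Int := ([2, 3, 5], 7)

def Spec_minOperationsBrute (nums : List Int) (k : Int) (out : Int) : Prop := out = minOperationsBrute_alt nums k
instance (nums : List Int) (k : Int) (out : Int) : Decidable (Spec_minOperationsBrute nums k out) := by unfold Spec_minOperationsBrute; infer_instance

-- ===== CLAIM (what is proved, stated in full; the proofs are below) =====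
def Claim_equal_minOperationsBrute : Prop := ∀ (nums : List Int) (k : Int), Dom_minOperationsBrute nums k → Pre_minOperationsBrute nums k → Spec_minOperationsBrute nums k (minOperationsBrute nums k)

-- ===== LEMMAS AND PROOFS =====

lemma minOpsInsert_cons (x : Int) (xs : List Int) (v : Int) :
    minOpsInsert (x :: xs) v = if x ≤ v then x :: minOpsInsert xs v else v :: x :: xs := by
  simp only [minOpsInsert, minOpsInsPos]
  split
  · simp
  · simp

lemma minOpsInsert_perm (xs : List Int) (v : Int) : (minOpsInsert xs v).Perm (v :: xs) := by
  induction xs with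
  | nil => simp [minOpsInsert, minOpsInsPos]
  | cons x xs ih =>
      rw [minOpsInsert_cons]
      split
      · exact ((ih.cons x).trans (List.Perm.swap v x xs))
      · exact List.Perm.refl _


lemma minOpsInsert_pairwise (xs : List Int) (v : Int) (h : xs.Pairwise (· ≤ ·)) :
    (minOpsInsert xs v).Pairwise (· ≤ ·) := by
  induction xs with
  | nil => simp [minOpsInsert, minOpsInsPos]
  | cons x xs ih =>
      rw [List.pairwise_cons] at h
      obtain ⟨hx, hxs⟩ := h
      rw [minOpsInsert_cons]
      split
      · rename_i hxv
        rw [List.pairwise_cons]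
        refine ⟨?_, ih hxs⟩
        intro y hy
        have hy2 : y ∈ v :: xs := (minOpsInsert_perm xs v).mem_iff.1 hy
        rcases List.mem_cons.1 hy2 with h' | hy'
        · omega
        · exact hx y hy'
      · rename_i hxv
        rw [List.pairwise_cons]
        constructor
        · intro y hy
          rcases List.mem_cons.1 hy with h' | hy'
          · omega
          · have := hx y hy'
            omega
        · exact List.pairwise_cons.2 ⟨hx, hxs⟩

lemma insert_eq_sorted (rest : List Int) (v : Int) (h : rest.Pairwise (· ≤ ·)) :
    PySem.List.sorted (rest ++ [v]) (fun x => x) = minOpsInsert rest v := by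
  apply PySem.List.sorted_id_eq_of_perm_of_pairwise
  · exact (minOpsInsert_perm rest v).trans (List.perm_append_singleton v rest).symm
  · exact minOpsInsert_pairwise rest v h

lemma min?_eq_head (nums : List Int) (a : Int) (t : List Int)
    (h : PySem.List.sorted nums (fun x => x) = a :: t) :
    PySem.List.min? nums (fun x => x) = some a := by
  cases hm : PySem.List.min? nums (fun x => x) with
  | none =>
      have : nums = [] := (PySem.List.min?_eq_none_iff nums (fun x => x)).1 hm
      subst this
      simp [PySem.List.sorted] at h
  | some m =>
      have hmem : m ∈ nums := PySem.List.min?_mem hm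
      have hmin : ∀ y ∈ nums, m ≤ y := PySem.List.min?_isMin hm
      have hle : ∀ y ∈ nums, a ≤ y := PySem.List.key_head_sorted_le nums (fun x => x) h
      have ha : a ∈ nums := by
        have : a ∈ PySem.List.sorted nums (fun x => x) := by rw [h]; exact List.mem_cons_self
        exact (PySem.List.mem_sorted nums (fun x => x) false a).1 this
      have h1 := hmin a ha
      have h2 := hle m hmem
      have : m = a := le_antisymm h1 h2
      rw [this]

lemma loop_eq (n : Nat) : ∀ (nums : List Int) (k ops : Int), nums.length ≤ n → nums ≠ [] →
    minOpsALoop nums k ops = minOpsBLoop (PySem.List.sorted nums (fun x => x)) k ops := by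
  induction n with
  | zero =>
      intro nums k ops hlen hne
      cases nums with
      | nil => exact absurd rfl hne
      | cons a t => simp at hlen
  | succ n ih =>
      intro nums k ops hlen hne
      match hs : PySem.List.sorted nums (fun x => x) with
      | [] =>
          exact absurd ((PySem.List.sorted_eq_nil_iff nums (fun x => x) false).1 hs) hne
      | [a] =>
          have hm := min?_eq_head nums a [] hs
          rw [minOpsALoop, hm, hs]
          by_cases hak : a < k
          · simp [hak, minOpsBLoop]
          · simp [hak, minOpsBLoop]
      | a :: b :: rest =>
          have hm := min?_eq_head nums a (b :: rest) hs
          have hpw : (a :: b :: rest).Pairwise (fun x y => x ≤ y) := by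
            have := PySem.List.sorted_pairwise (xs := nums) (key := fun x => x)
            rw [hs] at this
            exact this
          have hab : a ≤ b := by
            rw [List.pairwise_cons] at hpw
            exact hpw.1 b List.mem_cons_self
          have hrest : rest.Pairwise (fun x y => x ≤ y) := by
            rw [List.pairwise_cons] at hpw
            have := hpw.2
            rw [List.pairwise_cons] at this
            exact this.2
          have hlen' : (a :: b :: rest).length = nums.length := by
            rw [← hs]; exact PySem.List.length_sorted nums (fun x => x) false
          rw [minOpsALoop, hm, hs]
          by_cases hak : a < k
          · simp only [hak, if_true]
            have hminmax : min a b * 2 + max a b = 2 * a + b := by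
              rw [min_eq_left hab, max_eq_right hab]; ring
            rw [hminmax]
            have hrec := ih (rest ++ [2 * a + b]) k (ops + 1)
              (by simp at hlen' ⊢; omega) (by simp)
            rw [hrec, insert_eq_sorted rest (2 * a + b) hrest]
            simp [minOpsBLoop, hak]
          · simp [hak, minOpsBLoop]

-- ===== VERDICT (by name: the statement is the Claim_ definition above) =====
theorem minOperationsBrute_spec : Claim_equal_minOperationsBrute := by
  intro nums k _ hpre
  unfold Spec_minOperationsBrute minOperationsBrute minOperationsBrute_alt
  exact loop_eq nums.length nums k 0 le_rfl hpre
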